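-- pv_equiv track=rewrite | github.com/inaciovasquez2020/overlap-rigidity-counterexamples | scripts/wl3_radius_refinement.py | wl3_radius_refine
-- ===== SOURCE A (Python) =====
-- def induced_ball(adj, center, R):
--     visited = {center}
--     frontier = {center}
--     for _ in range(R):
--         new = set()
--         for v in frontier:
--             new |= adj[v]
--         new -= visited
--         visited |= new
--         frontier = new
--     return visited
--
-- def wl3_radius_refine(adj, R, rounds=5):
--     """
--     WL3 refinement restricted to radius-R balls.
--     Colors are assigned to vertex triples (a,b,c)
--     using only local information.
--     """
--
--     # initial color: equality pattern + distances
--     triples = []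
--     for a in adj:
--         for b in adj:
--             for c in adj:
--                 triples.append((a, b, c))
--
--     colors = {}
--     next_id = 0
--
--     for (a, b, c) in triples:
--         eq = (a == b, b == c, a == c)
--         colors[(a, b, c)] = (eq,)
--
--     for _ in range(rounds):
--         sigs = {}
--         for (a, b, c) in triples:
--             ball = (
--                 induced_ball(adj, a, R)
--                 | induced_ball(adj, b, R)
--                 | induced_ball(adj, c, R)
--             )
--
--             neigh_sigs = []
--
--             for x in ball:
--                 neigh_sigs.append(
--                     (
--                         colors.get((x, b, c)),
--                         colors.get((a, x, c)),
--                         colors.get((a, b, x)),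
--                     )
--                 )
--
--             sigs[(a, b, c)] = (colors[(a, b, c)], tuple(sorted(neigh_sigs)))
--
--         # relabel
--         new_colors = {}
--         color_map = {}
--         next_id = 0
--
--         for t in sigs:
--             s = sigs[t]
--             if s not in color_map:
--                 color_map[s] = next_id
--                 next_id += 1
--             new_colors[t] = color_map[s]
--
--         colors = new_colors
--
--     return colors
-- ===== SOURCE B (Python) =====
-- def wl3_radius_refine(adj, R, rounds=5):
--     """
--     WL3 refinement restricted to radius-R balls.
--     Re-implementation: each vertex's radius-R ball is computed once up
--     front by a list-queue BFS (the balls do not depend on the colors),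
--     instead of three set-algebra BFS runs per triple per round, and the
--     signature pass and the relabel pass of each round are fused into a
--     single loop using dict.setdefault.
--     """
--     verts = list(adj)
--
--     balls = {}
--     for v in verts:
--         seen = {v}
--         frontier = [v]
--         for _ in range(R):
--             nxt = []
--             for u in frontier:
--                 for w in adj[u]:
--                     if w not in seen:
--                         seen.add(w)
--                         nxt.append(w)
--             frontier = nxt
--         balls[v] = seen
--
--     triples = [(a, b, c) for a in verts for b in verts for c in verts]
--     colors = {(a, b, c): ((a == b, b == c, a == c),) for (a, b, c) in triples}
--
--     for _ in range(rounds):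
--         color_map = {}
--         new_colors = {}
--         for (a, b, c) in triples:
--             ball = balls[a] | balls[b] | balls[c]
--             sig = (colors[(a, b, c)],
--                    tuple(sorted((colors.get((x, b, c)), colors.get((a, x, c)), colors.get((a, b, x)))
--                                 for x in ball)))
--             new_colors[(a, b, c)] = color_map.setdefault(sig, len(color_map))
--         colors = new_colors
--
--     return colors
-- ===== Notes on version B (the rewrite author's own statement) =====
-- stated objective: alternative
-- what changed: B computes each vertex's radius-R ball once up front with a list-queue BFS (per-edge seen check) and caches them in a dict, instead of three set-algebra BFS runs per triple per round, and fuses the signature pass and the relabel pass of each round into a single loop using color_map.setdefault(sig, len(color_map)) in place of the separate sigs dict and next_id counter.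
-- outside the precondition, e.g. on wl3_radius_refine({5: {7}}, 2, -1): A returns {(5, 5, 5): ((True, True, True),)}, B raises KeyError
import Mathlib
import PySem

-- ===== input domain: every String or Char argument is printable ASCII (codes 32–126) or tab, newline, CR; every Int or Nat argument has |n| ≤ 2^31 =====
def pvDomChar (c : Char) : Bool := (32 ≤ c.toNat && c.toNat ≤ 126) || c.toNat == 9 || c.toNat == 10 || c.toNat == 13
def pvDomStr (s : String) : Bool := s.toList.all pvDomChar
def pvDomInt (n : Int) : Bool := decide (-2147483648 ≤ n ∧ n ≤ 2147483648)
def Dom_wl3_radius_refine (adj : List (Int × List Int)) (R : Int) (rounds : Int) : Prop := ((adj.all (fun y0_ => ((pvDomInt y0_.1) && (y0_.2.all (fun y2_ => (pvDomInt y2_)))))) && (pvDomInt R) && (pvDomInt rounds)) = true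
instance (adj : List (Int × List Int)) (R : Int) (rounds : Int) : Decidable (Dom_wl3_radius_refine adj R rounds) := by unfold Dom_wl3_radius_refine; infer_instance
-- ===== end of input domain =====

-- B hoists the radius-R balls out of the rounds loop (one list-queue BFS per vertex, cached in
-- a dict, instead of three set-algebra BFS runs per triple per round) and fuses the signature
-- and relabel passes of each round into one loop; the return value is unchanged (objective: alternative).

-- ===== PORT A =====

-- Dynamic color values: round 0 stores the 1-tuple ((a==b,b==c,a==c),), later rounds store ints.
inductive PyColor where
  | init (b1 b2 b3 : Bool)
  | num (n : Int)
deriving DecidableEq, Repr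

-- final colors are always `num` when rounds ≥ 1 (Pre_); `init` is mapped to 0, unreachable there
def pvColorInt : PyColor → Int
  | .num n => n
  | .init _ _ _ => 0

-- injective sort key for the neighbour-signature triples (Python compares these tuples
-- lexicographically; within one round all entries are homogeneous, where this order is exact)
def pvEncO : Option PyColor → List Int
  | none => [2]
  | some (.init b1 b2 b3) => [0, cond b1 1 0, cond b2 1 0, cond b3 1 0]
  | some (.num n) => [1, n]

def pvEnc (p : Option PyColor × Option PyColor × Option PyColor) : List Int :=
  pvEncO p.1 ++ pvEncO p.2.1 ++ pvEncO p.2.2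

-- sorted(neigh_sigs) under the lexicographic tuple order
def pvSorted (xs : List (Option PyColor × Option PyColor × Option PyColor)) :
    List (Option PyColor × Option PyColor × Option PyColor) :=
  PySem.List.sorted xs pvEnc false

-- the Python argument is a dict {vertex: set of neighbours}
def pvAdj (adj : List (Int × List Int)) : PySem.Dict Int (PySem.Set Int) :=
  PySem.Dict.ofList (adj.map (fun kv => (kv.1, PySem.Set.ofList kv.2)))

-- induced_ball: `for _ in range(R)` as fuel recursion; adj[v] is getD [] (KeyError excluded by Pre_)
def pvBallGo (adj : PySem.Dict Int (PySem.Set Int)) : Nat → PySem.Set Int → PySem.Set Int → PySem.Set Int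
  | 0, visited, _ => visited
  | n + 1, visited, frontier =>
      let new := frontier.foldl (fun acc v => PySem.Set.union acc ((adj.get? v).getD [])) PySem.Set.empty
      let new2 := PySem.Set.diff new visited
      pvBallGo adj n (PySem.Set.union visited new2) new2

def pvBall (adj : PySem.Dict Int (PySem.Set Int)) (center : Int) (R : Int) : PySem.Set Int :=
  pvBallGo adj R.toNat (PySem.Set.ofList [center]) (PySem.Set.ofList [center])

-- one WL round of A: build the sigs dict (three fresh BFS per triple), then relabel over its keys
def pvRoundA (d : PySem.Dict Int (PySem.Set Int)) (R : Int) (triples : List (Int × Int × Int))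
    (colors : PySem.Dict (Int × Int × Int) PyColor) : PySem.Dict (Int × Int × Int) PyColor :=
  let sigs := triples.foldl (fun sg t =>
      let ball := PySem.Set.union (PySem.Set.union (pvBall d t.1 R) (pvBall d t.2.1 R)) (pvBall d t.2.2 R)
      let neigh := ball.foldl (fun acc x =>
          acc ++ [(colors.get? (x, t.2.1, t.2.2), colors.get? (t.1, x, t.2.2), colors.get? (t.1, t.2.1, x))]) []
      sg.insert t (colors.getD t (PyColor.num 0), pvSorted neigh)) PySem.Dict.empty
  let st := (sigs.keys).foldl (fun st t =>
      let s := sigs.getD t (PyColor.num 0, [])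
      let cm := if st.2.1.contains s then st.2.1 else st.2.1.insert s st.2.2
      let ni := if st.2.1.contains s then st.2.2 else st.2.2 + 1
      (st.1.insert t (PyColor.num (cm.getD s 0)), cm, ni))
    ((PySem.Dict.empty : PySem.Dict (Int × Int × Int) PyColor),
     (PySem.Dict.empty : PySem.Dict (PyColor × List (Option PyColor × Option PyColor × Option PyColor)) Int),
     (0 : Int))
  st.1

def pvRoundsA (d : PySem.Dict Int (PySem.Set Int)) (R : Int) (triples : List (Int × Int × Int)) :
    Nat → PySem.Dict (Int × Int × Int) PyColor → PySem.Dict (Int × Int × Int) PyColor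
  | 0, colors => colors
  | n + 1, colors => pvRoundsA d R triples n (pvRoundA d R triples colors)

def wl3_radius_refine (adj : List (Int × List Int)) (R : Int) (rounds : Int) : List (Int × Int × Int × Int) :=
  let d := pvAdj adj
  let verts := d.keys
  let triples := verts.foldl (fun ts a => verts.foldl (fun ts b =>
      verts.foldl (fun ts c => ts ++ [(a, b, c)]) ts) ts) ([] : List (Int × Int × Int))
  let colors0 := triples.foldl (fun cs t =>
      cs.insert t (PyColor.init (t.1 == t.2.1) (t.2.1 == t.2.2) (t.1 == t.2.2))) PySem.Dict.empty
  let colors := pvRoundsA d R triples rounds.toNat colors0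
  colors.items.map (fun p => (p.1.1, p.1.2.1, p.1.2.2, pvColorInt p.2))

-- ===== PORT B =====

-- one BFS level of B: a list queue with an in-loop seen check ('for w in adj[u]: if w not in seen')
def pvLevelB (d : PySem.Dict Int (PySem.Set Int)) (frontier : List Int) (seen : PySem.Set Int) :
    PySem.Set Int × List Int :=
  frontier.foldl (fun st u =>
      ((d.get? u).getD []).foldl (fun st w =>
        if st.1.contains w then st else (PySem.Set.add st.1 w, st.2 ++ [w])) st)
    (seen, [])

def pvBallBGo (d : PySem.Dict Int (PySem.Set Int)) : Nat → PySem.Set Int → List Int → PySem.Set Int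
  | 0, seen, _ => seen
  | n + 1, seen, frontier =>
      let st := pvLevelB d frontier seen
      pvBallBGo d n st.1 st.2

def pvBallB (d : PySem.Dict Int (PySem.Set Int)) (v : Int) (R : Int) : PySem.Set Int :=
  pvBallBGo d R.toNat (PySem.Set.ofList [v]) [v]

-- one WL round of B: a single fused loop; balls come from the precomputed cache,
-- new ids from color_map.setdefault(sig, len(color_map))
def pvRoundB (balls : PySem.Dict Int (PySem.Set Int)) (triples : List (Int × Int × Int))
    (colors : PySem.Dict (Int × Int × Int) PyColor) : PySem.Dict (Int × Int × Int) PyColor :=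
  (triples.foldl (fun st t =>
      let ball := PySem.Set.union (PySem.Set.union (balls.getD t.1 []) (balls.getD t.2.1 [])) (balls.getD t.2.2 [])
      let s := (colors.getD t (PyColor.num 0),
        pvSorted (ball.map (fun x =>
          (colors.get? (x, t.2.1, t.2.2), colors.get? (t.1, x, t.2.2), colors.get? (t.1, t.2.1, x)))))
      let v := (st.2.get? s).getD ((st.2.size : Int))
      (st.1.insert t (PyColor.num v), st.2.setdefault s ((st.2.size : Int))))
    ((PySem.Dict.empty : PySem.Dict (Int × Int × Int) PyColor),
     (PySem.Dict.empty : PySem.Dict (PyColor × List (Option PyColor × Option PyColor × Option PyColor)) Int))).1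

def wl3_radius_refine_alt (adj : List (Int × List Int)) (R : Int) (rounds : Int) : List (Int × Int × Int × Int) :=
  let d := pvAdj adj
  let verts := d.keys
  let balls := PySem.Dict.ofList (verts.map (fun v => (v, pvBallB d v R)))
  let triples := verts.flatMap (fun a => verts.flatMap (fun b => verts.map (fun c => (a, b, c))))
  let colors0 := PySem.Dict.ofList (triples.map (fun t =>
      (t, PyColor.init (t.1 == t.2.1) (t.2.1 == t.2.2) (t.1 == t.2.2))))
  let colors := (pvRoundB balls triples)^[rounds.toNat] colors0
  colors.items.map (fun p => (p.1.1, p.1.2.1, p.1.2.2, pvColorInt p.2))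

-- ===== PRECONDITION & SPEC =====
-- Pre_ excludes (a) rounds ≤ 0, where A returns the initial tuple-valued colors, not ints
-- (outside the declared return type), and (b) R ≥ 1 with some listed neighbour that is not a
-- key of adj, where A raises (KeyError in the BFS, or TypeError sorting None signatures);
def Pre_wl3_radius_refine (adj : List (Int × List Int)) (R : Int) (rounds : Int) : Prop :=
  1 ≤ rounds ∧ (R ≤ 0 ∨ ∀ p ∈ adj, ∀ x ∈ p.2, (adj.any (fun q => q.1 == x)) = true)
instance (adj : List (Int × List Int)) (R : Int) (rounds : Int) : Decidable (Pre_wl3_radius_refine adj R rounds) := by unfold Pre_wl3_radius_refine; infer_instance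

def pvWitness_wl3_radius_refine : (List (Int × List Int)) × Int × Int := ([(0, [1]), (1, [0])], 1, 1)

def Spec_wl3_radius_refine (adj : List (Int × List Int)) (R : Int) (rounds : Int) (out : List (Int × Int × Int × Int)) : Prop := out = wl3_radius_refine_alt adj R rounds
instance (adj : List (Int × List Int)) (R : Int) (rounds : Int) (out : List (Int × Int × Int × Int)) : Decidable (Spec_wl3_radius_refine adj R rounds out) := by unfold Spec_wl3_radius_refine; infer_instance

-- ===== CLAIM (what is proved, stated in full; the proofs are below) =====
def Claim_equal_wl3_radius_refine : Prop := ∀ (adj : List (Int × List Int)) (R : Int) (rounds : Int), Dom_wl3_radius_refine adj R rounds → Pre_wl3_radius_refine adj R rounds → Spec_wl3_radius_refine adj R rounds (wl3_radius_refine adj R rounds)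

-- ===== LEMMAS AND PROOFS =====

-- lookup in a dict built by inserting a value computed from each key
theorem pv_get?_build {κ ν : Type} [BEq κ] [LawfulBEq κ] [DecidableEq κ]
    (l : List κ) (f : κ → ν) (d : PySem.Dict κ ν) (v : κ) :
    (l.foldl (fun dd k => dd.insert k (f k)) d).get? v =
      if v ∈ l then some (f v) else d.get? v := by
  induction l generalizing d with
  | nil => simp
  | cons h t ih =>
      simp only [List.foldl_cons, ih, PySem.Dict.get?_insert, List.mem_cons]
      by_cases hvt : v ∈ t <;> by_cases hvh : v = h <;> simp [hvt, hvh]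

theorem pv_getD_build {κ ν : Type} [BEq κ] [LawfulBEq κ] [DecidableEq κ]
    (l : List κ) (f : κ → ν) (v : κ) (d0 : ν) (hv : v ∈ l) :
    ((l.foldl (fun dd k => dd.insert k (f k)) PySem.Dict.empty).getD v d0) = f v := by
  rw [PySem.Dict.getD_eq_get?_getD, pv_get?_build]
  simp [hv]

theorem pv_ofList_map {κ ν : Type} [BEq κ] (l : List κ) (f : κ → ν) :
    PySem.Dict.ofList (l.map (fun k => (k, f k))) =
      l.foldl (fun dd k => dd.insert k (f k)) PySem.Dict.empty := by
  show (l.map (fun k => (k, f k))).foldl (fun d p => d.insert p.1 p.2) PySem.Dict.empty = _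
  rw [List.foldl_map]

-- A's nested append loops build the same triple list as B's comprehension
theorem pv_triples_eq (verts : List Int) :
    verts.foldl (fun ts a => verts.foldl (fun ts b =>
        verts.foldl (fun ts c => ts ++ [(a, b, c)]) ts) ts) ([] : List (Int × Int × Int)) =
      verts.flatMap (fun a => verts.flatMap (fun b => verts.map (fun c => (a, b, c)))) := by
  simp only [PySem.List.foldl_append_singleton_eq_map, PySem.List.foldl_append_eq_flatMap]
  exact List.nil_append _

theorem pv_triples_product (verts : List Int) :
    verts.flatMap (fun a => verts.flatMap (fun b => verts.map (fun c => (a, b, c)))) =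
      verts ×ˢ (verts ×ˢ verts) := by
  unfold List.instSProd
  simp only [List.product, List.map_flatMap, List.map_map, Function.comp_def]

theorem pv_triples_nodup (verts : List Int) (h : verts.Nodup) :
    (verts.flatMap (fun a => verts.flatMap (fun b => verts.map (fun c => (a, b, c))))).Nodup := by
  rw [pv_triples_product]
  exact List.Nodup.product h (List.Nodup.product h h)

theorem pv_mem_triples (verts : List Int) (t : Int × Int × Int)
    (ht : t ∈ verts.flatMap (fun a => verts.flatMap (fun b => verts.map (fun c => (a, b, c))))) :
    t.1 ∈ verts ∧ t.2.1 ∈ verts ∧ t.2.2 ∈ verts := by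
  simp only [List.mem_flatMap, List.mem_map] at ht
  obtain ⟨a, ha, b, hb, c, hc, rfl⟩ := ht
  exact ⟨ha, hb, hc⟩

-- pvEnc is a prefix code, hence injective (ties under the sort key are equal entries)
def pvDecO : List Int → Option (Option PyColor × List Int)
  | 2 :: r => some (none, r)
  | 1 :: n :: r => some (some (.num n), r)
  | 0 :: b1 :: b2 :: b3 :: r => some (some (.init (b1 == 1) (b2 == 1) (b3 == 1)), r)
  | _ => none

theorem pv_decO_enc (a : Option PyColor) (r : List Int) : pvDecO (pvEncO a ++ r) = some (a, r) := by
  match a with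
  | none => rfl
  | some (.num n) => rfl
  | some (.init b1 b2 b3) => cases b1 <;> cases b2 <;> cases b3 <;> rfl

theorem pv_enc_inj : Function.Injective pvEnc := by
  intro p q h
  unfold pvEnc at h
  have h1 := congrArg pvDecO h
  rw [List.append_assoc, List.append_assoc, pv_decO_enc, pv_decO_enc] at h1
  obtain ⟨he1, h2⟩ : p.1 = q.1 ∧ pvEncO p.2.1 ++ pvEncO p.2.2 = pvEncO q.2.1 ++ pvEncO q.2.2 := by
    simpa using h1
  have h3 := congrArg pvDecO h2
  rw [pv_decO_enc, pv_decO_enc] at h3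
  obtain ⟨he2, h4⟩ : p.2.1 = q.2.1 ∧ pvEncO p.2.2 = pvEncO q.2.2 := by simpa using h3
  have h5 := congrArg pvDecO (congrArg (· ++ ([] : List Int)) h4)
  simp only [pv_decO_enc] at h5
  obtain ⟨he3, -⟩ : p.2.2 = q.2.2 ∧ True := by simpa using h5
  exact Prod.ext he1 (Prod.ext he2 he3)

-- membership in A's frontier-union fold
theorem pv_mem_foldl_union (d : PySem.Dict Int (PySem.Set Int)) (fr : List Int)
    (acc : PySem.Set Int) (x : Int) :
    x ∈ fr.foldl (fun acc v => PySem.Set.union acc ((d.get? v).getD [])) acc ↔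
      x ∈ acc ∨ ∃ u ∈ fr, x ∈ ((d.get? u).getD []) := by
  induction fr generalizing acc with
  | nil => simp
  | cons h t ih =>
      simp only [List.foldl_cons, ih, PySem.Set.mem_union, List.mem_cons]
      constructor
      · rintro ((hx | hx) | ⟨u, hu, hx⟩)
        · exact Or.inl hx
        · exact Or.inr ⟨h, Or.inl rfl, hx⟩
        · exact Or.inr ⟨u, Or.inr hu, hx⟩
      · rintro (hx | ⟨u, (rfl | hu), hx⟩)
        · exact Or.inl (Or.inl hx)
        · exact Or.inl (Or.inr hx)
        · exact Or.inr ⟨u, hu, hx⟩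

theorem pv_nodup_foldl_union (d : PySem.Dict Int (PySem.Set Int)) (fr : List Int)
    (acc : PySem.Set Int) (h : acc.Nodup) :
    (fr.foldl (fun acc v => PySem.Set.union acc ((d.get? v).getD [])) acc).Nodup := by
  induction fr generalizing acc with
  | nil => exact h
  | cons u t ih => exact ih _ (PySem.Set.nodup_union _ _ h)

-- B's inner per-edge loop: invariant of (seen, nxt) over one neighbour list
theorem pv_innerB (seen0 : PySem.Set Int) (ws : List Int) (st : PySem.Set Int × List Int)
    (hnd : st.1.Nodup) (hm : ∀ x, x ∈ st.1 ↔ x ∈ seen0 ∨ x ∈ st.2) :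
    let r := ws.foldl (fun st w =>
      if st.1.contains w then st else (PySem.Set.add st.1 w, st.2 ++ [w])) st
    r.1.Nodup ∧ (∀ x, x ∈ r.1 ↔ x ∈ seen0 ∨ x ∈ r.2) ∧
      (∀ x, x ∈ r.2 ↔ x ∈ st.2 ∨ (x ∈ ws ∧ x ∉ seen0)) := by
  induction ws generalizing st with
  | nil => exact ⟨hnd, hm, fun x => by simp⟩
  | cons w t ih =>
      simp only [List.foldl_cons]
      by_cases hw : w ∈ st.1
      · rw [if_pos ((PySem.Set.contains_iff st.1 w).2 hw)]
        obtain ⟨r1, r2, r3⟩ := ih st hnd hm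
        refine ⟨r1, r2, fun x => ?_⟩
        rw [r3]
        have hw2 : w ∉ seen0 → w ∈ st.2 := fun h0 => ((hm w).1 hw).resolve_left h0
        simp only [List.mem_cons]
        constructor
        · rintro (hx | ⟨hx, hx2⟩)
          · exact Or.inl hx
          · exact Or.inr ⟨Or.inr hx, hx2⟩
        · rintro (hx | ⟨(rfl | hx), hx2⟩)
          · exact Or.inl hx
          · exact Or.inl (hw2 hx2)
          · exact Or.inr ⟨hx, hx2⟩
      · rw [if_neg (fun hcc => hw ((PySem.Set.contains_iff st.1 w).1 hcc))]
        have hnd' : (PySem.Set.add st.1 w).Nodup := PySem.Set.nodup_add st.1 w hnd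
        have hm' : ∀ x, x ∈ PySem.Set.add st.1 w ↔ x ∈ seen0 ∨ x ∈ st.2 ++ [w] := by
          intro x
          rw [PySem.Set.mem_add, hm]
          simp only [List.mem_append, List.mem_singleton]
          tauto
        obtain ⟨r1, r2, r3⟩ := ih (PySem.Set.add st.1 w, st.2 ++ [w]) hnd' hm'
        refine ⟨r1, r2, fun x => ?_⟩
        rw [r3]
        have hw0 : w ∉ seen0 := fun h0 => hw ((hm w).2 (Or.inl h0))
        simp only [List.mem_append, List.mem_cons, List.not_mem_nil, or_false]
        constructor
        · rintro ((hx | rfl) | ⟨hx, hx2⟩)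
          · exact Or.inl hx
          · exact Or.inr ⟨Or.inl rfl, hw0⟩
          · exact Or.inr ⟨Or.inr hx, hx2⟩
        · rintro (hx | ⟨(rfl | hx), hx2⟩)
          · exact Or.inl (Or.inl hx)
          · exact Or.inl (Or.inr rfl)
          · exact Or.inr ⟨hx, hx2⟩

-- B's one BFS level: nxt collects exactly the new vertices, seen grows by them
theorem pv_levelB_spec (d : PySem.Dict Int (PySem.Set Int)) (fr : List Int) (seen : PySem.Set Int)
    (hnd : seen.Nodup) :
    (pvLevelB d fr seen).1.Nodup ∧
      (∀ x, x ∈ (pvLevelB d fr seen).1 ↔ x ∈ seen ∨ x ∈ (pvLevelB d fr seen).2) ∧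
      (∀ x, x ∈ (pvLevelB d fr seen).2 ↔ (∃ u ∈ fr, x ∈ ((d.get? u).getD [])) ∧ x ∉ seen) := by
  unfold pvLevelB
  suffices h : ∀ (st : PySem.Set Int × List Int), st.1.Nodup →
      (∀ x, x ∈ st.1 ↔ x ∈ seen ∨ x ∈ st.2) →
      (fr.foldl (fun st u => ((d.get? u).getD []).foldl (fun st w =>
        if st.1.contains w then st else (PySem.Set.add st.1 w, st.2 ++ [w])) st) st).1.Nodup ∧
      (∀ x, x ∈ (fr.foldl (fun st u => ((d.get? u).getD []).foldl (fun st w =>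
        if st.1.contains w then st else (PySem.Set.add st.1 w, st.2 ++ [w])) st) st).1 ↔
        x ∈ seen ∨ x ∈ (fr.foldl (fun st u => ((d.get? u).getD []).foldl (fun st w =>
        if st.1.contains w then st else (PySem.Set.add st.1 w, st.2 ++ [w])) st) st).2) ∧
      (∀ x, x ∈ (fr.foldl (fun st u => ((d.get? u).getD []).foldl (fun st w =>
        if st.1.contains w then st else (PySem.Set.add st.1 w, st.2 ++ [w])) st) st).2 ↔
        x ∈ st.2 ∨ ((∃ u ∈ fr, x ∈ ((d.get? u).getD [])) ∧ x ∉ seen)) by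
    obtain ⟨r1, r2, r3⟩ := h (seen, []) hnd (fun x => by simp)
    exact ⟨r1, r2, fun x => by rw [r3]; simp⟩
  induction fr with
  | nil => intro st h1 h2; exact ⟨h1, h2, fun x => by simp⟩
  | cons u t ih =>
      intro st h1 h2
      simp only [List.foldl_cons]
      obtain ⟨i1, i2, i3⟩ := pv_innerB seen ((d.get? u).getD []) st h1 h2
      obtain ⟨r1, r2, r3⟩ := ih _ i1 i2
      refine ⟨r1, r2, fun x => ?_⟩
      rw [r3, i3]
      simp only [List.mem_cons]
      constructor
      · rintro ((hx | ⟨hx, hx2⟩) | ⟨⟨v, hv, hx⟩, hx2⟩)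
        · exact Or.inl hx
        · exact Or.inr ⟨⟨u, Or.inl rfl, hx⟩, hx2⟩
        · exact Or.inr ⟨⟨v, Or.inr hv, hx⟩, hx2⟩
      · rintro (hx | ⟨⟨v, (rfl | hv), hx⟩, hx2⟩)
        · exact Or.inl (Or.inl hx)
        · exact Or.inl (Or.inr ⟨hx, hx2⟩)
        · exact Or.inr ⟨⟨v, hv, hx⟩, hx2⟩

-- the two BFS routines visit the same set of vertices
theorem pv_ball_go_equiv (d : PySem.Dict Int (PySem.Set Int)) (fuel : Nat) :
    ∀ (visA frA seenB : PySem.Set Int) (frB : List Int),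
      visA.Nodup → seenB.Nodup →
      (∀ x, x ∈ visA ↔ x ∈ seenB) → (∀ x, x ∈ frA ↔ x ∈ frB) →
      (pvBallGo d fuel visA frA).Nodup ∧ (pvBallBGo d fuel seenB frB).Nodup ∧
        (∀ x, x ∈ pvBallGo d fuel visA frA ↔ x ∈ pvBallBGo d fuel seenB frB) := by
  induction fuel with
  | zero => intro visA frA seenB frB h1 h2 h3 _; exact ⟨h1, h2, h3⟩
  | succ n ih =>
      intro visA frA seenB frB h1 h2 h3 h4
      simp only [pvBallGo, pvBallBGo]
      obtain ⟨l1, l2, l3⟩ := pv_levelB_spec d frB seenB h2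
      have hmemnew : ∀ x, x ∈ frA.foldl (fun acc v => PySem.Set.union acc ((d.get? v).getD [])) PySem.Set.empty ↔
          ∃ u ∈ frA, x ∈ ((d.get? u).getD []) := by
        intro x
        rw [pv_mem_foldl_union]
        simp [PySem.Set.empty]
      have hnd2 : (PySem.Set.diff (frA.foldl (fun acc v => PySem.Set.union acc ((d.get? v).getD [])) PySem.Set.empty) visA).Nodup :=
        PySem.Set.nodup_diff _ _ (pv_nodup_foldl_union d frA _ (by simp [PySem.Set.empty]))
      apply ih
      · exact PySem.Set.nodup_union _ _ h1
      · exact l1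
      · intro x
        simp only [PySem.Set.mem_union, PySem.Set.mem_diff, hmemnew, l2, l3, h3, h4]
      · intro x
        simp only [PySem.Set.mem_diff, hmemnew, l3, h3, h4]

theorem pv_ball_equiv (d : PySem.Dict Int (PySem.Set Int)) (v : Int) (R : Int) :
    (pvBall d v R).Nodup ∧ (pvBallB d v R).Nodup ∧
      (∀ x, x ∈ pvBall d v R ↔ x ∈ pvBallB d v R) := by
  unfold pvBall pvBallB
  exact pv_ball_go_equiv d R.toNat _ _ _ _ (PySem.Set.nodup_ofList _)
    (PySem.Set.nodup_ofList _) (fun x => Iff.rfl) (fun x => by rw [PySem.Set.mem_ofList])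

-- the per-triple ball of A and the cached ball of B are permutations of each other
theorem pv_tball_perm (d : PySem.Dict Int (PySem.Set Int)) (R : Int) (verts : List Int)
    (t : Int × Int × Int) (h1 : t.1 ∈ verts) (h2 : t.2.1 ∈ verts) (h3 : t.2.2 ∈ verts) :
    (PySem.Set.union (PySem.Set.union (pvBall d t.1 R) (pvBall d t.2.1 R)) (pvBall d t.2.2 R)).Perm
      (PySem.Set.union (PySem.Set.union
        ((PySem.Dict.ofList (verts.map (fun v => (v, pvBallB d v R)))).getD t.1 [])
        ((PySem.Dict.ofList (verts.map (fun v => (v, pvBallB d v R)))).getD t.2.1 []))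
        ((PySem.Dict.ofList (verts.map (fun v => (v, pvBallB d v R)))).getD t.2.2 [])) := by
  have hc : ∀ v ∈ verts,
      (PySem.Dict.ofList (verts.map (fun v => (v, pvBallB d v R)))).getD v [] = pvBallB d v R := by
    intro v hv
    rw [pv_ofList_map]
    exact pv_getD_build verts _ v [] hv
  rw [hc t.1 h1, hc t.2.1 h2, hc t.2.2 h3]
  obtain ⟨a1, b1, m1⟩ := pv_ball_equiv d t.1 R
  obtain ⟨a2, b2, m2⟩ := pv_ball_equiv d t.2.1 R
  obtain ⟨a3, b3, m3⟩ := pv_ball_equiv d t.2.2 R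
  rw [List.perm_ext_iff_of_nodup
    (PySem.Set.nodup_union _ _ (PySem.Set.nodup_union _ _ a1))
    (PySem.Set.nodup_union _ _ (PySem.Set.nodup_union _ _ b1))]
  intro x
  simp only [PySem.Set.mem_union, m1 x, m2 x, m3 x]

-- sorting a rearrangement of the same entries gives the same list (pvEnc is injective;
-- the PySem order lemma is stated under the List-Int linear-order instances, whose order
-- Prop is definitionally the default one — only the Decidable instances inside `decide`
-- differ, bridged through the insertBy normal form)
theorem pv_sorted_perm (xs ys : List (Option PyColor × Option PyColor × Option PyColor))
    (hp : xs.Perm ys) : pvSorted xs = pvSorted ys := by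
  have h0 := PySem.List.sorted_eq_sorted_of_perm xs ys pvEnc pv_enc_inj hp
  obtain ⟨c, hc, h⟩ : ∃ c : (Option PyColor × Option PyColor × Option PyColor) →
        (Option PyColor × Option PyColor × Option PyColor) → Bool,
      (c = fun a b => decide (pvEnc a < pvEnc b)) ∧
      xs.foldl (fun acc x => PySem.List.insertBy c x acc) [] =
        ys.foldl (fun acc x => PySem.List.insertBy c x acc) [] :=
    ⟨_, funext fun a => funext fun b => decide_eq_decide.mpr Iff.rfl, h0⟩
  unfold pvSorted
  rw [PySem.List.sorted_eq_foldl_insertBy, PySem.List.sorted_eq_foldl_insertBy]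
  rw [hc] at h
  exact h

-- A's signature (fold-append neighbour pass) equals B's (map over the cached ball)
theorem pv_sig_eq (d : PySem.Dict Int (PySem.Set Int)) (R : Int) (verts : List Int)
    (colors : PySem.Dict (Int × Int × Int) PyColor) (t : Int × Int × Int)
    (h1 : t.1 ∈ verts) (h2 : t.2.1 ∈ verts) (h3 : t.2.2 ∈ verts) :
    pvSorted
      ((PySem.Set.union (PySem.Set.union (pvBall d t.1 R) (pvBall d t.2.1 R)) (pvBall d t.2.2 R)).foldl
        (fun acc x => acc ++ [(colors.get? (x, t.2.1, t.2.2), colors.get? (t.1, x, t.2.2), colors.get? (t.1, t.2.1, x))]) []) =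
    pvSorted
      ((PySem.Set.union (PySem.Set.union
          ((PySem.Dict.ofList (verts.map (fun v => (v, pvBallB d v R)))).getD t.1 [])
          ((PySem.Dict.ofList (verts.map (fun v => (v, pvBallB d v R)))).getD t.2.1 []))
          ((PySem.Dict.ofList (verts.map (fun v => (v, pvBallB d v R)))).getD t.2.2 [])).map
        (fun x => (colors.get? (x, t.2.1, t.2.2), colors.get? (t.1, x, t.2.2), colors.get? (t.1, t.2.1, x)))) := by
  rw [PySem.List.foldl_append_singleton_eq_map, List.nil_append]
  exact pv_sorted_perm _ _ (List.Perm.map _ (pv_tball_perm d R verts t h1 h2 h3))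

-- A's two-pass round collapses to a fused single pass (sigs is keyed exactly by triples)
theorem pv_roundA_fused (d : PySem.Dict Int (PySem.Set Int)) (R : Int)
    (triples : List (Int × Int × Int)) (colors : PySem.Dict (Int × Int × Int) PyColor)
    (hn : triples.Nodup) :
    pvRoundA d R triples colors =
      (triples.foldl (fun st t =>
        let s := (colors.getD t (PyColor.num 0), pvSorted
          ((PySem.Set.union (PySem.Set.union (pvBall d t.1 R) (pvBall d t.2.1 R)) (pvBall d t.2.2 R)).foldl
            (fun acc x => acc ++ [(colors.get? (x, t.2.1, t.2.2), colors.get? (t.1, x, t.2.2), colors.get? (t.1, t.2.1, x))]) []))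
        let cm := if st.2.1.contains s then st.2.1 else st.2.1.insert s st.2.2
        let ni := if st.2.1.contains s then st.2.2 else st.2.2 + 1
        (st.1.insert t (PyColor.num (cm.getD s 0)), cm, ni))
      ((PySem.Dict.empty : PySem.Dict (Int × Int × Int) PyColor),
       (PySem.Dict.empty : PySem.Dict (PyColor × List (Option PyColor × Option PyColor × Option PyColor)) Int),
       (0 : Int))).1 := by
  simp only [pvRoundA]
  have hkeys : (triples.foldl (fun sg t =>
      sg.insert t (colors.getD t (PyColor.num 0), pvSorted
        ((PySem.Set.union (PySem.Set.union (pvBall d t.1 R) (pvBall d t.2.1 R)) (pvBall d t.2.2 R)).foldl (fun acc x =>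
          acc ++ [(colors.get? (x, t.2.1, t.2.2), colors.get? (t.1, x, t.2.2), colors.get? (t.1, t.2.1, x))]) []))) PySem.Dict.empty).keys = triples := by
    rw [PySem.Dict.keys_foldl_insert
      (f := fun _ t => (colors.getD t (PyColor.num 0), pvSorted
        ((PySem.Set.union (PySem.Set.union (pvBall d t.1 R) (pvBall d t.2.1 R)) (pvBall d t.2.2 R)).foldl (fun acc x =>
          acc ++ [(colors.get? (x, t.2.1, t.2.2), colors.get? (t.1, x, t.2.2), colors.get? (t.1, t.2.1, x))]) [])))]
    show PySem.Set.update PySem.Dict.empty.keys triples = triples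
    rw [show (PySem.Dict.empty : PySem.Dict (Int × Int × Int) _).keys = [] from rfl]
    show PySem.Set.ofList triples = triples
    exact PySem.Set.ofList_eq_self_of_nodup triples hn
  rw [hkeys]
  congr 1
  apply PySem.List.foldl_congr_mem
  intro st t htm
  have hget : (triples.foldl (fun sg t =>
      sg.insert t (colors.getD t (PyColor.num 0), pvSorted
        ((PySem.Set.union (PySem.Set.union (pvBall d t.1 R) (pvBall d t.2.1 R)) (pvBall d t.2.2 R)).foldl (fun acc x =>
          acc ++ [(colors.get? (x, t.2.1, t.2.2), colors.get? (t.1, x, t.2.2), colors.get? (t.1, t.2.1, x))]) []))) PySem.Dict.empty).getD t (PyColor.num 0, []) =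
      (colors.getD t (PyColor.num 0), pvSorted
        ((PySem.Set.union (PySem.Set.union (pvBall d t.1 R) (pvBall d t.2.1 R)) (pvBall d t.2.2 R)).foldl (fun acc x =>
          acc ++ [(colors.get? (x, t.2.1, t.2.2), colors.get? (t.1, x, t.2.2), colors.get? (t.1, t.2.1, x))]) [])) :=
    pv_getD_build triples _ t _ htm
  simp only [hget]

-- A's contains/insert/counter relabel step is B's setdefault/len step (next_id = len(color_map))
theorem pv_step_corr
    (nc : PySem.Dict (Int × Int × Int) PyColor)
    (cm : PySem.Dict (PyColor × List (Option PyColor × Option PyColor × Option PyColor)) Int)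
    (t : Int × Int × Int)
    (s : PyColor × List (Option PyColor × Option PyColor × Option PyColor)) :
    (nc.insert t (PyColor.num ((if cm.contains s then cm else cm.insert s ((cm.size : Int))).getD s 0)),
      (if cm.contains s then cm else cm.insert s ((cm.size : Int))),
      (if cm.contains s then ((cm.size : Int)) else (cm.size : Int) + 1)) =
    (nc.insert t (PyColor.num ((cm.get? s).getD ((cm.size : Int)))),
      cm.setdefault s ((cm.size : Int)),
      ((cm.setdefault s ((cm.size : Int))).size : Int)) := by
  by_cases hc : cm.contains s
  · have hsome : (cm.get? s).isSome := by
      rw [← PySem.Dict.contains_eq_isSome_get?]; exact hc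
    obtain ⟨v, hv⟩ := Option.isSome_iff_exists.1 hsome
    simp [hc, PySem.Dict.setdefault_of_contains _ _ hc, PySem.Dict.getD_eq_get?_getD, hv]
  · have hc' : cm.contains s = false := by simpa using hc
    have hg : cm.get? s = none := by
      have h2 := PySem.Dict.contains_eq_isSome_get? (d := cm) (k := s)
      rw [hc'] at h2
      exact Option.not_isSome_iff_eq_none.1 (by rw [← h2]; simp)
    simp [hc', PySem.Dict.setdefault_of_not_contains _ _ hc', PySem.Dict.getD_insert_self, hg,
      PySem.Dict.size_insert]

-- a fused A-round with B's signatures is literally B's round (fold induction carrying next_id = len)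
theorem pv_fold_corr (sigA sigB : (Int × Int × Int) → PyColor × List (Option PyColor × Option PyColor × Option PyColor))
    (l : List (Int × Int × Int)) (hs : ∀ t ∈ l, sigA t = sigB t) :
    ∀ (nc : PySem.Dict (Int × Int × Int) PyColor)
      (cm : PySem.Dict (PyColor × List (Option PyColor × Option PyColor × Option PyColor)) Int),
    (l.foldl (fun st t =>
        let s := sigA t
        let cm' := if st.2.1.contains s then st.2.1 else st.2.1.insert s st.2.2
        let ni := if st.2.1.contains s then st.2.2 else st.2.2 + 1
        (st.1.insert t (PyColor.num (cm'.getD s 0)), cm', ni)) (nc, cm, ((cm.size : Int)))).1 =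
    (l.foldl (fun st t =>
        let s := sigB t
        let v := (st.2.get? s).getD ((st.2.size : Int))
        (st.1.insert t (PyColor.num v), st.2.setdefault s ((st.2.size : Int)))) (nc, cm)).1 := by
  induction l with
  | nil => intro nc cm; rfl
  | cons t l ih =>
      intro nc cm
      simp only [List.foldl_cons]
      rw [hs t (List.mem_cons_self)]
      rw [pv_step_corr nc cm t (sigB t)]
      exact ih (fun u hu => hs u (List.mem_cons_of_mem _ hu)) _ _

-- one round of A equals one round of B
theorem pv_round_eq (d : PySem.Dict Int (PySem.Set Int)) (R : Int) (verts : List Int)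
    (hv : verts.Nodup) (colors : PySem.Dict (Int × Int × Int) PyColor) :
    pvRoundA d R (verts.flatMap (fun a => verts.flatMap (fun b => verts.map (fun c => (a, b, c))))) colors =
      pvRoundB (PySem.Dict.ofList (verts.map (fun v => (v, pvBallB d v R))))
        (verts.flatMap (fun a => verts.flatMap (fun b => verts.map (fun c => (a, b, c))))) colors := by
  set triples := verts.flatMap (fun a => verts.flatMap (fun b => verts.map (fun c => (a, b, c)))) with htr
  rw [pv_roundA_fused d R triples colors (pv_triples_nodup verts hv)]
  unfold pvRoundB
  have h := pv_fold_corr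
    (fun t => (colors.getD t (PyColor.num 0), pvSorted
      ((PySem.Set.union (PySem.Set.union (pvBall d t.1 R) (pvBall d t.2.1 R)) (pvBall d t.2.2 R)).foldl
        (fun acc x => acc ++ [(colors.get? (x, t.2.1, t.2.2), colors.get? (t.1, x, t.2.2), colors.get? (t.1, t.2.1, x))]) [])))
    (fun t => (colors.getD t (PyColor.num 0), pvSorted
      ((PySem.Set.union (PySem.Set.union
          ((PySem.Dict.ofList (verts.map (fun v => (v, pvBallB d v R)))).getD t.1 [])
          ((PySem.Dict.ofList (verts.map (fun v => (v, pvBallB d v R)))).getD t.2.1 []))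
          ((PySem.Dict.ofList (verts.map (fun v => (v, pvBallB d v R)))).getD t.2.2 [])).map
        (fun x => (colors.get? (x, t.2.1, t.2.2), colors.get? (t.1, x, t.2.2), colors.get? (t.1, t.2.1, x))))))
    triples
    (fun t ht => by
      obtain ⟨h1, h2, h3⟩ := pv_mem_triples verts t ht
      exact congrArg (fun z => (colors.getD t (PyColor.num 0), z)) (pv_sig_eq d R verts colors t h1 h2 h3))
    PySem.Dict.empty PySem.Dict.empty
  rw [show (((PySem.Dict.empty : PySem.Dict (PyColor × List (Option PyColor × Option PyColor × Option PyColor)) Int)).size : Int) = 0 from rfl] at h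
  exact h

theorem pv_rounds_eq (d : PySem.Dict Int (PySem.Set Int)) (R : Int) (verts : List Int)
    (hv : verts.Nodup) (n : Nat) (colors : PySem.Dict (Int × Int × Int) PyColor) :
    pvRoundsA d R (verts.flatMap (fun a => verts.flatMap (fun b => verts.map (fun c => (a, b, c))))) n colors =
      (pvRoundB (PySem.Dict.ofList (verts.map (fun v => (v, pvBallB d v R))))
        (verts.flatMap (fun a => verts.flatMap (fun b => verts.map (fun c => (a, b, c))))))^[n] colors := by
  induction n generalizing colors with
  | zero => rfl
  | succ m ih =>
      show pvRoundsA d R _ m (pvRoundA d R _ colors) = _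
      rw [Function.iterate_succ_apply, pv_round_eq d R verts hv colors, ih]

-- ===== VERDICT (by name: the statement is the Claim_ definition above) =====
theorem wl3_radius_refine_spec : Claim_equal_wl3_radius_refine := by
  intro adj R rounds _hDom _hPre
  unfold Spec_wl3_radius_refine
  simp only [wl3_radius_refine, wl3_radius_refine_alt]
  have hverts : (pvAdj adj).keys.Nodup := by
    unfold pvAdj
    show ((adj.map (fun kv => (kv.1, PySem.Set.ofList kv.2))).foldl (fun d p => d.insert p.1 p.2) PySem.Dict.empty).keys.Nodup
    rw [List.foldl_map]
    exact PySem.Dict.nodup_keys_foldl_insert_key _ _ _ _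
      (by rw [show (PySem.Dict.empty : PySem.Dict Int (PySem.Set Int)).keys = [] from rfl]; exact List.nodup_nil)
  set d := pvAdj adj with hd
  set verts := d.keys with hv
  rw [pv_triples_eq verts]
  have hcol0 : ((verts.flatMap (fun a => verts.flatMap (fun b => verts.map (fun c => (a, b, c))))).foldl (fun cs t =>
      cs.insert t (PyColor.init (t.1 == t.2.1) (t.2.1 == t.2.2) (t.1 == t.2.2))) PySem.Dict.empty) =
      PySem.Dict.ofList ((verts.flatMap (fun a => verts.flatMap (fun b => verts.map (fun c => (a, b, c))))).map (fun t =>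
        (t, PyColor.init (t.1 == t.2.1) (t.2.1 == t.2.2) (t.1 == t.2.2)))) := by
    rw [pv_ofList_map]
  rw [hcol0, pv_rounds_eq d R verts hverts]
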